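-- pv_equiv track=rewrite | github.com/sirouk/almanac | python/arclink_dashboard_auth_proxy.py | _is_mounted_public_path
-- ===== SOURCE A (Python) =====
-- MOUNTED_PUBLIC_PATH_ROOTS = ("/api/", "/assets/", "/dashboard-plugins/", "/ds-assets/", "/fonts/")
--
-- def _is_mounted_public_path(path: str) -> bool:
--     candidate = str(path or "")
--     return any(candidate.startswith(root) for root in MOUNTED_PUBLIC_PATH_ROOTS) or candidate in {
--         "/api",
--         "/assets",
--         "/dashboard-plugins",
--         "/ds-assets",
--         "/fonts",
--     }
-- ===== SOURCE B (Python) =====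
-- _PUBLIC_ROOT_NAMES = {"api", "assets", "dashboard-plugins", "ds-assets", "fonts"}
--
-- def _is_mounted_public_path(path: str) -> bool:
--     parts = str(path or "").split("/")
--     return len(parts) >= 2 and parts[0] == "" and parts[1] in _PUBLIC_ROOT_NAMES
-- ===== Notes on version B (the rewrite author's own statement) =====
-- stated objective: idiomatic
-- what changed: B splits the path once on '/' and does a single membership test of the first segment against the set of mounted root names, instead of A's five startswith prefix scans plus a five-element set equality test.
import Mathlib
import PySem

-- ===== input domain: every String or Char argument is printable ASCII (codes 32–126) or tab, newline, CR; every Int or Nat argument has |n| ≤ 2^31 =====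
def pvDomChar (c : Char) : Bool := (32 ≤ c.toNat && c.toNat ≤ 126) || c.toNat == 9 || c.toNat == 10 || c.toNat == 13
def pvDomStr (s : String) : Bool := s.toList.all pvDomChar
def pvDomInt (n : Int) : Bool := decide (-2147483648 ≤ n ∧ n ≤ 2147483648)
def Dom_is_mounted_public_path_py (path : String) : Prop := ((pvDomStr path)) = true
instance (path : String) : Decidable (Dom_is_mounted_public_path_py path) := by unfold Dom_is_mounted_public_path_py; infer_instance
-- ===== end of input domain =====

set_option maxHeartbeats 1000000


-- B replaces A's five startswith-prefix scans and five equality tests with one split on '/'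
-- and a single membership test of the first path segment (objective: idiomatic; same cost).

-- ===== PORT A =====
-- MOUNTED_PUBLIC_PATH_ROOTS = ("/api/", "/assets/", "/dashboard-plugins/", "/ds-assets/", "/fonts/");
-- candidate = str(path or "") is just `path` for a str argument ("" stays "").
def is_mounted_public_path_py (path : String) : Bool :=
  let candidate := path
  (PySem.Str.startswith candidate "/api/" ||
   PySem.Str.startswith candidate "/assets/" ||
   PySem.Str.startswith candidate "/dashboard-plugins/" ||
   PySem.Str.startswith candidate "/ds-assets/" ||
   PySem.Str.startswith candidate "/fonts/") ||
  (candidate == "/api" || candidate == "/assets" || candidate == "/dashboard-plugins" ||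
   candidate == "/ds-assets" || candidate == "/fonts")

-- ===== PORT B =====
-- parts = str(path or "").split("/"); len(parts) >= 2 and parts[0] == "" and parts[1] in {…}
-- (split on the non-empty separator "/" never fails, hence the .getD []; the getD defaults
-- for parts[0]/parts[1] are irrelevant because the length check short-circuits Python's `and`).
def is_mounted_public_path_py_alt (path : String) : Bool :=
  let parts := (PySem.Str.split? path "/").getD []
  decide (2 ≤ parts.length) && (parts.getD 0 "" == "") &&
    (["api", "assets", "dashboard-plugins", "ds-assets", "fonts"].contains (parts.getD 1 ""))

-- ===== PRECONDITION & SPEC =====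
def Spec_is_mounted_public_path_py (path : String) (out : Bool) : Prop := out = is_mounted_public_path_py_alt path
instance (path : String) (out : Bool) : Decidable (Spec_is_mounted_public_path_py path out) := by unfold Spec_is_mounted_public_path_py; infer_instance

-- ===== CLAIM (what is proved, stated in full; the proofs are below) =====
def Claim_equal_is_mounted_public_path_py : Prop := ∀ (path : String), Dom_is_mounted_public_path_py path → Spec_is_mounted_public_path_py path (is_mounted_public_path_py path)

-- ===== LEMMAS AND PROOFS =====

-- splitOn.go with enough fuel: result is acc.reverse, then the current piece extended by the
-- chars of l up to the first '/', then a tail which is empty iff no '/' remains in l.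
theorem pv_go_spec : ∀ (fuel : Nat) (l cur : List Char) (acc : List (List Char)), l.length ≤ fuel →
    ∃ rest, PySem.Chars.splitOn.go ['/'] fuel l cur acc =
        acc.reverse ++ (cur.reverse ++ l.takeWhile (fun c => c != '/')) :: rest ∧
      (rest = [] ↔ l.dropWhile (fun c => c != '/') = []) := by
  intro fuel
  induction fuel with
  | zero =>
    intro l cur acc hl
    have : l = [] := List.eq_nil_of_length_eq_zero (Nat.le_zero.mp hl)
    subst this
    exact ⟨[], by rw [PySem.Chars.splitOn.go.eq_def]; simp, by simp⟩
  | succ n ih =>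
    intro l cur acc hl
    cases l with
    | nil => exact ⟨[], by rw [PySem.Chars.splitOn.go.eq_def]; simp, by simp⟩
    | cons c t =>
      by_cases hc : c = '/'
      · subst hc
        obtain ⟨rest, h1, _⟩ := ih t [] ((cur.reverse) :: acc) (by simpa using Nat.lt_succ_iff.mp (by simpa using hl))
        refine ⟨(t.takeWhile (fun c => c != '/')) :: rest, ?_, by simp⟩
        rw [PySem.Chars.splitOn.go.eq_def]
        simp only [List.isPrefixOf]
        simp [h1]
      · obtain ⟨rest, h1, h2⟩ := ih t (c :: cur) acc (by simpa using Nat.lt_succ_iff.mp (by simpa using hl))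
        refine ⟨rest, ?_, ?_⟩
        · rw [PySem.Chars.splitOn.go.eq_def]
          have hcc : (('/' : Char) == c) = false := by simp [Ne.symm hc]
          simp [List.isPrefixOf, hcc, h1, List.append_assoc, hc]
        · simpa [List.dropWhile_cons, hc] using h2

-- splitOn on a path that starts with '/': first piece is empty, second piece is the
-- first segment (the chars of t up to the next '/').
theorem pv_splitOn_slash (t : List Char) :
    ∃ rest, PySem.Chars.splitOn ('/' :: t) ['/'] = [] :: (t.takeWhile (fun c => c != '/')) :: rest := by
  obtain ⟨rest, h1, _⟩ := pv_go_spec (t.length + 1) t [] [[]] (by omega)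
  refine ⟨rest, ?_⟩
  unfold PySem.Chars.splitOn
  rw [PySem.Chars.splitOn.go.eq_def]
  simp only [List.isPrefixOf]
  simpa using h1

theorem pv_splitOn_head (cs : List Char) :
    ∃ rest, PySem.Chars.splitOn cs ['/'] = (cs.takeWhile (fun c => c != '/')) :: rest := by
  obtain ⟨rest, h1, _⟩ := pv_go_spec (cs.length + 1) cs [] [] (by omega)
  exact ⟨rest, by unfold PySem.Chars.splitOn; simpa using h1⟩

-- first-segment characterisation: for a '/'-free name, t starts with "name/" or equals name
-- exactly when the chars of t before the first '/' are name.
theorem pv_seg_iff (name t : List Char) (h : ('/' : Char) ∉ name) :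
    ((name ++ ['/']) <+: t ∨ t = name) ↔ t.takeWhile (fun c => c != '/') = name := by
  constructor
  · rintro (⟨u, hu⟩ | rfl)
    · subst hu
      rw [List.append_assoc, List.takeWhile_append]
      have hall : name.takeWhile (fun c => c != '/') = name :=
        List.takeWhile_eq_self_iff.mpr (by intro a ha; simp; rintro rfl; exact h ha)
      simp [hall]
    · exact List.takeWhile_eq_self_iff.mpr (by intro a ha; simp; rintro rfl; exact h ha)
  · intro ht
    have hsplit : t.takeWhile (fun c => c != '/') ++ t.dropWhile (fun c => c != '/') = t :=
      List.takeWhile_append_dropWhile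
    rw [ht] at hsplit
    cases hd : t.dropWhile (fun c => c != '/') with
    | nil => right; rw [← hsplit, hd]; simp
    | cons c d =>
      left
      have hcne : (fun c => c != '/') c = false := by
        have := @List.head_dropWhile_not _ (fun c => c != '/') t (by simp [hd])
        simpa [hd] using this
      have : c = '/' := by simpa using hcne
      subst this
      exact ⟨d, by rw [← hsplit, hd]; simp⟩

-- Bool form of pv_seg_iff for the '/'-headed path as the ports compute it.
theorem pv_seg_bool (name t : List Char) (h : ('/' : Char) ∉ name) :
    (PySem.Chars.startswith ('/' :: t) ('/' :: (name ++ ['/'])) || (('/' :: t : List Char) == '/' :: name))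
      = (t.takeWhile (fun c => c != '/') == name) := by
  rw [Bool.eq_iff_iff]
  simp only [Bool.or_eq_true, PySem.Chars.startswith_iff, beq_iff_eq, List.cons_prefix_cons,
    List.cons.injEq, true_and]
  rw [← pv_seg_iff name t h]

theorem pv_beq_toList (s u : String) : (s == u) = (s.toList == u.toList) := by
  rw [Bool.eq_iff_iff]; simp [String.toList_inj]

theorem pv_bool_shuffle (s1 s2 s3 s4 s5 q1 q2 q3 q4 q5 : Bool) :
    ((s1 || s2 || s3 || s4 || s5) || (q1 || q2 || q3 || q4 || q5)) =
      ((s1 || q1) || (s2 || q2) || (s3 || q3) || (s4 || q4) || (s5 || q5)) := by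
  cases s1 <;> cases s2 <;> cases s3 <;> cases s4 <;> cases s5 <;>
    cases q1 <;> cases q2 <;> cases q3 <;> cases q4 <;> cases q5 <;> rfl

theorem pv_ofList_beq (a : List Char) (b : String) : (String.ofList a == b) = (a == b.toList) := by
  rw [pv_beq_toList, String.toList_ofList]

theorem pv_main_list (cs : List Char) :
    (PySem.Chars.startswith cs "/api/".toList ||
     PySem.Chars.startswith cs "/assets/".toList ||
     PySem.Chars.startswith cs "/dashboard-plugins/".toList ||
     PySem.Chars.startswith cs "/ds-assets/".toList ||
     PySem.Chars.startswith cs "/fonts/".toList ||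
     (cs == "/api".toList || cs == "/assets".toList || cs == "/dashboard-plugins".toList ||
      cs == "/ds-assets".toList || cs == "/fonts".toList)) =
    (decide (2 ≤ ((PySem.Chars.splitOn cs ['/']).map String.ofList).length) &&
     (((PySem.Chars.splitOn cs ['/']).map String.ofList).getD 0 "" == "") &&
     (["api", "assets", "dashboard-plugins", "ds-assets", "fonts"].contains
        (((PySem.Chars.splitOn cs ['/']).map String.ofList).getD 1 ""))) := by
  cases cs with
  | nil =>
    rw [show PySem.Chars.splitOn [] ['/'] = [[]] from by
      unfold PySem.Chars.splitOn; rw [PySem.Chars.splitOn.go.eq_def]; simp]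
    rw [Bool.eq_iff_iff]
    simp [PySem.Chars.startswith_iff, ← String.toList_inj]
  | cons c t =>
    have e1 : ("/api/".toList) = '/' :: ("api".toList ++ ['/']) := by simp
    have e2 : ("/assets/".toList) = '/' :: ("assets".toList ++ ['/']) := by simp
    have e3 : ("/dashboard-plugins/".toList) = '/' :: ("dashboard-plugins".toList ++ ['/']) := by simp
    have e4 : ("/ds-assets/".toList) = '/' :: ("ds-assets".toList ++ ['/']) := by simp
    have e5 : ("/fonts/".toList) = '/' :: ("fonts".toList ++ ['/']) := by simp
    have f1 : ("/api".toList) = '/' :: "api".toList := by simp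
    have f2 : ("/assets".toList) = '/' :: "assets".toList := by simp
    have f3 : ("/dashboard-plugins".toList) = '/' :: "dashboard-plugins".toList := by simp
    have f4 : ("/ds-assets".toList) = '/' :: "ds-assets".toList := by simp
    have f5 : ("/fonts".toList) = '/' :: "fonts".toList := by simp
    rw [e1, e2, e3, e4, e5, f1, f2, f3, f4, f5]
    by_cases hc : c = '/'
    · subst hc
      obtain ⟨rest, hsp⟩ := pv_splitOn_slash t
      rw [hsp]
      have g1 := pv_seg_bool ("api".toList) t (by simp)
      have g2 := pv_seg_bool ("assets".toList) t (by simp)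
      have g3 := pv_seg_bool ("dashboard-plugins".toList) t (by simp)
      have g4 := pv_seg_bool ("ds-assets".toList) t (by simp)
      have g5 := pv_seg_bool ("fonts".toList) t (by simp)
      rw [pv_bool_shuffle]
      rw [g1, g2, g3, g4, g5]
      simp only [List.map_cons, List.getD_cons_zero, List.getD_cons_succ,
        List.contains_cons, List.contains_nil, Bool.or_false, pv_ofList_beq,
        List.length_cons]
      rw [Bool.eq_iff_iff]
      simp only [Bool.or_eq_true, Bool.and_eq_true, decide_eq_true_eq]
      constructor
      · intro hx
        exact ⟨⟨by omega, by simp⟩, by tauto⟩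
      · rintro ⟨-, hx⟩
        tauto
    · obtain ⟨rest, hsp⟩ := pv_splitOn_head (c :: t)
      rw [List.takeWhile_cons, if_pos (by simpa using hc)] at hsp
      rw [hsp]
      have hA : ∀ xs : List Char, PySem.Chars.startswith (c :: t) ('/' :: xs) = false := by
        intro xs
        cases h : PySem.Chars.startswith (c :: t) ('/' :: xs) with
        | false => rfl
        | true =>
          have hp : ('/' :: xs) <+: (c :: t) := by
            rw [← PySem.Chars.startswith_iff]; exact h
          exact absurd (List.cons_prefix_cons.mp hp).1.symm hc
      have hq : ∀ xs : List Char, ((c :: t : List Char) == ('/' :: xs)) = false := by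
        intro xs
        simp [hc]
      have hb : (String.ofList (c :: List.takeWhile (fun c => c != '/') t) == "") = false := by
        rw [pv_ofList_beq]
        simp
      rw [hA, hA, hA, hA, hA, hq, hq, hq, hq, hq]
      simp only [List.map_cons, List.getD_cons_zero, List.getD_cons_succ, hb]
      simp

theorem pv_main (path : String) :
    is_mounted_public_path_py path = is_mounted_public_path_py_alt path := by
  unfold is_mounted_public_path_py is_mounted_public_path_py_alt
  simp only [PySem.Str.startswith_eq, pv_beq_toList, PySem.Str.split?, PySem.Chars.split?]
  simpa [pv_beq_toList] using pv_main_list path.toList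

-- ===== VERDICT (by name: the statement is the Claim_ definition above) =====
theorem is_mounted_public_path_py_spec : Claim_equal_is_mounted_public_path_py := by
  intro path _
  unfold Spec_is_mounted_public_path_py
  exact pv_main path
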